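-- pv_equiv track=rewrite | github.com/human-technology-institute/structure_learning | src/mcmc/utils/partition_utils.py | calculate_partition_transitions
-- ===== SOURCE A (Python) =====
-- def calculate_partition_transitions(n, party, posy):
--     m = len(party)
--     hole_possibs = [0] * n
--     for k in range(n):
--         node_element = posy[k]
--         if party[node_element] == 1:  # Nodes in a partition element of size 1 cannot move to the neighbouring holes
--             hole_possibs[k] = m - 1
--             if node_element < m - 1:
--                 if party[node_element + 1] == 1:  # And if the next partition element is also size 1
--                     hole_possibs[k] = m - 2  # We only allow them to jump to the left to count the swap only once
--         elif party[node_element] == 2:  # Nodes in a partition element of size 2 cannot move to the hole on the left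
--             hole_possibs[k] = m  # Since this would count the same splitting twice
--         else:
--             hole_possibs[k] = m + 1
--     return hole_possibs
-- ===== SOURCE B (Python) =====
-- def calculate_partition_transitions(n, party, posy):
--     m = len(party)
--     elem_possibs = []
--     for e in range(m):
--         if party[e] == 1:
--             if e < m - 1 and party[e + 1] == 1:
--                 elem_possibs.append(m - 2)
--             else:
--                 elem_possibs.append(m - 1)
--         elif party[e] == 2:
--             elem_possibs.append(m)
--         else:
--             elem_possibs.append(m + 1)
--     return [elem_possibs[posy[k]] for k in range(n)]
-- ===== Notes on version B (the rewrite author's own statement) =====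
-- stated objective: alternative
-- what changed: B precomputes a length-m table of per-element possibility counts in one pass over the partition and then maps each node position through that table, instead of re-deriving the branch logic inside the per-node loop.
-- intended difference: When some posy[k] (k < n) is the Python negative index -1 and both the first and last partition elements have size 1, A follows node_element+1 around to party[0] and returns m-2 at that node, while B treats -1 as the last element (which has no right neighbour) and returns m-1, the intended value. — e.g. on calculate_partition_transitions(1, [1], [-1]): A returns [-1], B returns [0]
import Mathlib
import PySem

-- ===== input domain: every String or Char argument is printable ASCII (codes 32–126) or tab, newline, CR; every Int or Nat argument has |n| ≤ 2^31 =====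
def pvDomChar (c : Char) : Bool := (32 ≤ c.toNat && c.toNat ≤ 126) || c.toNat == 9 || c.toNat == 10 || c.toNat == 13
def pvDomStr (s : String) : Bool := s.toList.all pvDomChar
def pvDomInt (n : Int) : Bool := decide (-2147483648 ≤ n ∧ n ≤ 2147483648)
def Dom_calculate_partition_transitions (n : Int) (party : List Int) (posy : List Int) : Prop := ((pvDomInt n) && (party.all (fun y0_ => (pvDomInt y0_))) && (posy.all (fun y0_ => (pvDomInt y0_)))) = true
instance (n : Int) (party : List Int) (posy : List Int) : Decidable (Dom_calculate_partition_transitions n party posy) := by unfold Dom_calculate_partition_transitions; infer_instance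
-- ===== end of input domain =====

-- B precomputes a per-element possibility table in one pass over the partition and maps node
-- positions through it (objective: alternative decomposition; same asymptotic cost).

-- ===== PORT A =====
-- one iteration of A's `for k in range(n)` loop body (out-of-range lookups return 0; Pre_ excludes them)
def pvAStep (m : Int) (party posy : List Int) (hp : List Int) (k : Int) : List Int :=
  let ne := (PySem.List.pyGet? posy k).getD 0
  if (PySem.List.pyGet? party ne).getD 0 = 1 then
    let hp1 := hp.set k.toNat (m - 1)
    if ne < m - 1 then
      if (PySem.List.pyGet? party (ne + 1)).getD 0 = 1 then hp1.set k.toNat (m - 2) else hp1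
    else hp1
  else if (PySem.List.pyGet? party ne).getD 0 = 2 then hp.set k.toNat m
  else hp.set k.toNat (m + 1)

def calculate_partition_transitions (n : Int) (party : List Int) (posy : List Int) : List Int :=
  let m : Int := party.length
  (PySem.List.pyRange 0 n 1).foldl (pvAStep m party posy) (List.replicate n.toNat 0)

-- ===== PORT B =====
-- per-element value of B's table-building loop body
def pvElemVal (m : Int) (party : List Int) (e : Int) : Int :=
  if (PySem.List.pyGet? party e).getD 0 = 1 then
    if e < m - 1 ∧ (PySem.List.pyGet? party (e + 1)).getD 0 = 1 then m - 2 else m - 1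
  else if (PySem.List.pyGet? party e).getD 0 = 2 then m
  else m + 1

def calculate_partition_transitions_alt (n : Int) (party : List Int) (posy : List Int) : List Int :=
  let m : Int := party.length
  let table := (PySem.List.pyRange 0 m 1).map (pvElemVal m party)
  (PySem.List.pyRange 0 n 1).map
    (fun k => (PySem.List.pyGet? table ((PySem.List.pyGet? posy k).getD 0)).getD 0)

-- ===== PRECONDITION & SPEC =====
-- Pre_ excludes exactly the inputs where A raises IndexError: n exceeding len(posy), or a
-- node position posy[k] (k < n) outside Python's valid index range [-len(party), len(party)).
def Pre_calculate_partition_transitions (n : Int) (party : List Int) (posy : List Int) : Prop :=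
  n.toNat ≤ posy.length ∧
    ∀ p ∈ posy.take n.toNat, -(party.length : Int) ≤ p ∧ p < (party.length : Int)
instance (n : Int) (party : List Int) (posy : List Int) : Decidable (Pre_calculate_partition_transitions n party posy) := by unfold Pre_calculate_partition_transitions; infer_instance
def pvWitness_calculate_partition_transitions : Int × List Int × List Int := (2, [1, 2], [0, 1])

-- When some used posy[k] is the Python negative index -1 and both the first and last partition
-- elements have size 1, A wraps node_element+1 around to party[0] and returns m-2 at that node,
-- while B treats -1 as the last element (which has no right neighbour) and returns m-1, the
-- intended value.
def D_calculate_partition_transitions (n : Int) (party : List Int) (posy : List Int) : Prop :=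
  (-1 : Int) ∈ posy.take n.toNat ∧ party.head? = some 1 ∧ party.getLast? = some 1
instance (n : Int) (party : List Int) (posy : List Int) : Decidable (D_calculate_partition_transitions n party posy) := by unfold D_calculate_partition_transitions; infer_instance

def Spec_calculate_partition_transitions (n : Int) (party : List Int) (posy : List Int) (out : List Int) : Prop := ¬ D_calculate_partition_transitions n party posy → out = calculate_partition_transitions_alt n party posy
instance (n : Int) (party : List Int) (posy : List Int) (out : List Int) : Decidable (Spec_calculate_partition_transitions n party posy out) := by unfold Spec_calculate_partition_transitions; infer_instance

def pvDiffWitness_calculate_partition_transitions : Int × List Int × List Int := (1, [1], [-1])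
def pvDiffWitnessOut_calculate_partition_transitions : (List Int) × (List Int) := ([-1], [0])

-- ===== CLAIM (what is proved, stated in full; the proofs are below) =====
def Claim_unchanged_calculate_partition_transitions : Prop := ∀ (n : Int) (party : List Int) (posy : List Int), Dom_calculate_partition_transitions n party posy → Pre_calculate_partition_transitions n party posy → Spec_calculate_partition_transitions n party posy (calculate_partition_transitions n party posy)
def Claim_changed_calculate_partition_transitions : Prop := Dom_calculate_partition_transitions (pvDiffWitness_calculate_partition_transitions.1) (pvDiffWitness_calculate_partition_transitions.2.1) (pvDiffWitness_calculate_partition_transitions.2.2) ∧ Pre_calculate_partition_transitions (pvDiffWitness_calculate_partition_transitions.1) (pvDiffWitness_calculate_partition_transitions.2.1) (pvDiffWitness_calculate_partition_transitions.2.2) ∧ D_calculate_partition_transitions (pvDiffWitness_calculate_partition_transitions.1) (pvDiffWitness_calculate_partition_transitions.2.1) (pvDiffWitness_calculate_partition_transitions.2.2) ∧ calculate_partition_transitions (pvDiffWitness_calculate_partition_transitions.1) (pvDiffWitness_calculate_partition_transitions.2.1) (pvDiffWitness_calculate_partition_transitions.2.2) = pvDiffWitnessOut_calculate_partition_transitions.1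 ∧ calculate_partition_transitions_alt (pvDiffWitness_calculate_partition_transitions.1) (pvDiffWitness_calculate_partition_transitions.2.1) (pvDiffWitness_calculate_partition_transitions.2.2) = pvDiffWitnessOut_calculate_partition_transitions.2 ∧ pvDiffWitnessOut_calculate_partition_transitions.1 ≠ pvDiffWitnessOut_calculate_partition_transitions.2
def Claim_exact_calculate_partition_transitions : Prop := ∀ (n : Int) (party : List Int) (posy : List Int), Dom_calculate_partition_transitions n party posy → Pre_calculate_partition_transitions n party posy → D_calculate_partition_transitions n party posy → calculate_partition_transitions n party posy ≠ calculate_partition_transitions_alt n party posy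

-- ===== LEMMAS AND PROOFS =====

-- the value A's loop body writes at index k
def pvAVal (m : Int) (party posy : List Int) (k : Int) : Int :=
  let ne := (PySem.List.pyGet? posy k).getD 0
  if (PySem.List.pyGet? party ne).getD 0 = 1 then
    if ne < m - 1 then
      if (PySem.List.pyGet? party (ne + 1)).getD 0 = 1 then m - 2 else m - 1
    else m - 1
  else if (PySem.List.pyGet? party ne).getD 0 = 2 then m
  else m + 1

theorem pvAStep_eq_set (m : Int) (party posy : List Int) (hp : List Int) (k : Int) :
    pvAStep m party posy hp k = hp.set k.toNat (pvAVal m party posy k) := by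
  unfold pvAStep pvAVal
  dsimp only
  split_ifs <;> simp [List.set_set]

theorem pvFoldl_set (f : Int → Int) :
    ∀ (jn : Nat) (init : List Int), jn ≤ init.length →
      (PySem.List.pyRange 0 (jn : Int) 1).foldl (fun hp k => hp.set k.toNat (f k)) init
        = (List.range jn).map (fun i : Nat => f (i : Int)) ++ init.drop jn := by
  intro jn
  induction jn with
  | zero => intro init _; simp [PySem.List.pyRange_one_eq_nil]
  | succ j ih =>
    intro init h
    have hcast : ((j + 1 : Nat) : Int) = (j : Int) + 1 := by push_cast; ring
    rw [hcast, PySem.List.pyRange_one_succ_right (by positivity), List.foldl_append,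
      ih init (by omega)]
    have hlen : ((List.range j).map (fun i => f i)).length = j := by simp
    simp only [List.foldl_cons, List.foldl_nil]
    rw [List.drop_eq_getElem_cons (by omega : j < init.length)]
    have : ((j : Int)).toNat = j := by omega
    rw [this]
    simp [List.range_succ]
    rw [List.drop_eq_getElem_cons (show j < init.length by omega), List.set_cons_zero]


theorem calc_A_eq_map (n : Int) (party posy : List Int) :
    calculate_partition_transitions n party posy
      = (List.range n.toNat).map (fun i : Nat => pvAVal (party.length : Int) party posy (i : Int)) := by
  unfold calculate_partition_transitions
  dsimp only
  have hstep : pvAStep (party.length : Int) party posy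
      = fun hp k => hp.set k.toNat (pvAVal (party.length : Int) party posy k) :=
    funext fun hp => funext fun k => pvAStep_eq_set _ _ _ _ _
  rw [hstep]
  rcases (show n ≤ 0 ∨ 0 < n by omega) with h | h
  · rw [PySem.List.pyRange_one_eq_nil h]
    simp [Int.toNat_of_nonpos h]
  · have hn : n = (n.toNat : Int) := by omega
    conv_lhs => rw [hn]
    rw [show ((n.toNat : Int)).toNat = n.toNat by omega,
      pvFoldl_set _ n.toNat _ (by simp)]
    simp

theorem calc_B_eq_map (n : Int) (party posy : List Int) :
    calculate_partition_transitions_alt n party posy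
      = (List.range n.toNat).map (fun i : Nat =>
          (PySem.List.pyGet? ((PySem.List.pyRange 0 (party.length : Int) 1).map
              (pvElemVal (party.length : Int) party))
            ((PySem.List.pyGet? posy (i : Int)).getD 0)).getD 0) := by
  unfold calculate_partition_transitions_alt
  dsimp only
  rcases (show n ≤ 0 ∨ 0 < n by omega) with h | h
  · rw [PySem.List.pyRange_one_eq_nil h]
    simp [Int.toNat_of_nonpos h]
  · have hn : n = (n.toNat : Int) := by omega
    conv_lhs => rw [hn]
    simp only [PySem.List.pyRange_zero_natCast, List.map_map]
    simp [Function.comp, PySem.List.pyGet?_natCast]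

-- table lookup resolves to pvElemVal at the normalized (nonnegative) index
theorem pvTable_lookup (party : List Int) (p : Int)
    (h1 : -(party.length : Int) ≤ p) (h2 : p < (party.length : Int)) :
    (PySem.List.pyGet? ((PySem.List.pyRange 0 (party.length : Int) 1).map
        (pvElemVal (party.length : Int) party)) p).getD 0
      = pvElemVal (party.length : Int) party (if 0 ≤ p then p else p + party.length) := by
  rw [PySem.List.pyRange_zero_natCast, List.map_map]
  rcases (show 0 ≤ p ∨ p < 0 by omega) with h | h
  · rw [if_pos h, PySem.List.pyGet?_of_nonneg _ h]
    have hlt : p.toNat < party.length := by omega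
    rw [List.getElem?_map]
    simp [List.getElem?_range hlt, Int.toNat_of_nonneg h]
  · rw [if_neg (by omega)]
    have hk : p = -(((-p).toNat : Nat) : Int) := by omega
    conv_lhs => rw [hk]
    rw [PySem.List.pyGet?_neg_natCast _ _ (by omega) (by simp; omega)]
    have hlt : party.length - (-p).toNat < party.length := by omega
    rw [List.getElem?_map]
    simp only [List.length_map, List.length_range] at *
    rw [List.getElem?_range hlt]
    simp only [Option.map_some, Option.getD_some, Function.comp_apply]
    congr 1
    omega

-- elementwise agreement outside the D_ corner
theorem pvElem_agree (party posy : List Int) (k : Nat) (hk : k < posy.length)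
    (p : Int) (hp : posy[k] = p)
    (h1 : -(party.length : Int) ≤ p) (h2 : p < (party.length : Int))
    (hD : ¬ (p = -1 ∧ party.head? = some 1 ∧ party.getLast? = some 1)) :
    pvAVal (party.length : Int) party posy (k : Int)
      = pvElemVal (party.length : Int) party (if 0 ≤ p then p else p + party.length) := by
  have hm : 1 ≤ party.length := by omega
  have hne : (PySem.List.pyGet? posy (k : Int)).getD 0 = p := by
    rw [PySem.List.pyGet?_natCast, List.getElem?_eq_getElem hk, hp]; rfl
  unfold pvAVal
  dsimp only
  rw [hne]
  rcases (show 0 ≤ p ∨ p = -1 ∨ p ≤ -2 by omega) with h | h | h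
  · -- nonnegative index: same lookups, only the if-shape differs
    rw [if_pos h]
    unfold pvElemVal
    split_ifs with a b c d e <;> first | rfl | (exfalso; tauto)
  · -- p = -1: A inspects party[0]; B's last element has no right neighbour
    subst h
    rw [if_neg (show ¬ (0:Int) ≤ -1 by omega)]
    have hlget : party.getLast? = some party[party.length - 1] := by
      rw [List.getLast?_eq_getElem?, List.getElem?_eq_getElem (by omega)]
    have hlast : PySem.List.pyGet? party (-1) = party.getLast? := PySem.List.pyGet?_neg_one party
    have hBe : PySem.List.pyGet? party (-1 + (party.length : Int)) = party.getLast? := by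
      rw [show (-1 + (party.length : Int)) = ((party.length - 1 : Nat) : Int) by omega,
        PySem.List.pyGet?_natCast, hlget, List.getElem?_eq_getElem (by omega)]
    have hhead : PySem.List.pyGet? party (-1 + 1) = party.head? := by
      norm_num
      cases party <;> simp [PySem.List.pyGet?_zero]
    unfold pvElemVal
    rw [hlast, hBe, hhead,
      if_neg (show ¬ ((-1 + (party.length:Int)) < (party.length:Int) - 1 ∧
        (PySem.List.pyGet? party (-1 + (party.length:Int) + 1)).getD 0 = 1) from
        fun hc => absurd hc.1 (by omega)),
      if_pos (show (-1:Int) < (party.length:Int) - 1 by omega)]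
    by_cases hL : (party.getLast?).getD 0 = 1
    · rw [if_pos hL, if_pos hL]
      rw [if_neg]
      intro hc
      apply hD
      refine ⟨rfl, ?_, ?_⟩
      · have hh : party.head? = some party[0] := by
          cases party with
          | nil => simp at hm
          | cons a t => rfl
        rw [hh] at hc
        simp only [Option.getD_some] at hc
        rw [hh, hc]
      · rw [hlget] at hL
        simp only [Option.getD_some] at hL
        rw [hlget, hL]
    · rw [if_neg hL, if_neg hL]
  · -- p ≤ -2: wraparound agrees with the table
    rw [if_neg (show ¬ (0:Int) ≤ p by omega)]
    have hA1 : PySem.List.pyGet? party p = PySem.List.pyGet? party (p + party.length) := by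
      rw [show p = -(((-p).toNat : Nat) : Int) by omega,
        PySem.List.pyGet?_neg_natCast _ _ (by omega) (by omega),
        show (-(((-p).toNat : Nat) : Int) + (party.length : Int)) = ((party.length - (-p).toNat : Nat) : Int) by omega,
        PySem.List.pyGet?_natCast]
    have hA2 : PySem.List.pyGet? party (p + 1) = PySem.List.pyGet? party (p + party.length + 1) := by
      rw [show p + 1 = -(((-(p+1)).toNat : Nat) : Int) by omega,
        PySem.List.pyGet?_neg_natCast _ _ (by omega) (by omega),
        show (p + (party.length : Int) + 1) = ((party.length - (-(p+1)).toNat : Nat) : Int) by omega,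
        PySem.List.pyGet?_natCast]
    unfold pvElemVal
    rw [hA1, hA2, if_pos (show p < (party.length:Int) - 1 by omega)]
    simp only [and_iff_right (show p + (party.length:Int) < (party.length:Int) - 1 by omega)]


-- ===== VERDICT (by name: the statement is the Claim_ definition above) =====
theorem calculate_partition_transitions_spec : Claim_unchanged_calculate_partition_transitions := by
  intro n party posy _ hPre
  unfold Spec_calculate_partition_transitions
  intro hD
  obtain ⟨hlen, hbnd⟩ := hPre
  rw [calc_A_eq_map, calc_B_eq_map]
  apply List.map_congr_left
  intro i hi
  rw [List.mem_range] at hi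
  have hkpos : i < posy.length := lt_of_lt_of_le hi hlen
  have hmemtake : posy[i] ∈ posy.take n.toNat := by
    have hgt : (posy.take n.toNat)[i]'(by simp; omega) = posy[i] := List.getElem_take
    exact hgt ▸ List.getElem_mem _
  obtain ⟨h1, h2⟩ := hbnd _ hmemtake
  have hne : (PySem.List.pyGet? posy (i : Int)).getD 0 = posy[i] := by
    rw [PySem.List.pyGet?_natCast, List.getElem?_eq_getElem hkpos]; rfl
  rw [hne, pvTable_lookup party _ h1 h2]
  exact pvElem_agree party posy i hkpos _ rfl h1 h2
    (fun hc => hD ⟨hc.1 ▸ hmemtake, hc.2⟩)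

theorem calculate_partition_transitions_changed : Claim_changed_calculate_partition_transitions := by
  unfold Claim_changed_calculate_partition_transitions; decide

theorem calculate_partition_transitions_tight : Claim_exact_calculate_partition_transitions := by
  intro n party posy _ hPre hD heq
  obtain ⟨hmem, hh, hl⟩ := hD
  obtain ⟨hlen, hbnd⟩ := hPre
  obtain ⟨i, hi, hgi⟩ := List.getElem_of_mem hmem
  have hi' : i < n.toNat := by simp at hi; omega
  have hkpos : i < posy.length := by omega
  have hp : posy[i] = -1 := by rw [← List.getElem_take (h := hi)]; exact hgi
  have hnil : party ≠ [] := by intro e; rw [e] at hl; simp at hl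
  have hm : 1 ≤ party.length := List.length_pos_iff.mpr hnil
  have hne : (PySem.List.pyGet? posy (i : Int)).getD 0 = -1 := by
    rw [PySem.List.pyGet?_natCast, List.getElem?_eq_getElem hkpos, hp]; rfl
  have hA : pvAVal (party.length : Int) party posy (i : Int) = (party.length : Int) - 2 := by
    unfold pvAVal
    dsimp only
    rw [hne, PySem.List.pyGet?_neg_one, hl]
    have hhead : PySem.List.pyGet? party (-1 + 1) = party.head? := by
      norm_num
      cases party <;> simp [PySem.List.pyGet?_zero]
    rw [if_pos (by simp), if_pos (show (-1 : Int) < (party.length : Int) - 1 by omega),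
      hhead, hh, if_pos (by simp)]
  have hBe : PySem.List.pyGet? party (-1 + (party.length : Int)) = party.getLast? := by
    rw [show (-1 + (party.length : Int)) = ((party.length - 1 : Nat) : Int) by omega,
      PySem.List.pyGet?_natCast, List.getLast?_eq_getElem?]
  have hB : pvElemVal (party.length : Int) party (-1 + party.length) = (party.length : Int) - 1 := by
    unfold pvElemVal
    rw [hBe, hl, if_pos (by simp),
      if_neg (show ¬ ((-1 + (party.length : Int)) < (party.length : Int) - 1 ∧
        (PySem.List.pyGet? party (-1 + (party.length : Int) + 1)).getD 0 = 1) from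
        fun hc => absurd hc.1 (by omega))]
  rw [calc_A_eq_map, calc_B_eq_map] at heq
  have hel := congrArg (fun l => l[i]?) heq
  simp only [List.getElem?_map, List.getElem?_range hi', Option.map_some] at hel
  rw [hA, hne, pvTable_lookup party (-1) (by omega) (by omega),
    if_neg (show ¬ (0 : Int) ≤ -1 by omega), hB] at hel
  simp at hel
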